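-- pv_equiv track=rewrite | github.com/VenkyHari98/indian_screener-dashboard | server.py | _default_scanner_option
-- ===== SOURCE A (Python) =====
-- def _default_scanner_option(scanners):
--     if not scanners:
--         return "X:12:1"
--
--     for preferred_source in ("actions-data-scan", "config", "built-in"):
--         for item in scanners:
--             if item.get("source") == preferred_source and item.get("option"):
--                 return str(item.get("option"))
--
--     first = scanners[0].get("option")
--     return str(first) if first else "X:12:1"
-- ===== SOURCE B (Python) =====
-- _PRIORITY = {"actions-data-scan": 0, "config": 1, "built-in": 2}
--
-- def _default_scanner_option(scanners):
--     if not scanners: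
--         return "X:12:1"
--     best = None  # (rank, option): lowest-priority-rank item, first wins on ties
--     for item in scanners:
--         opt = item.get("option")
--         if not opt:
--             continue
--         rank = _PRIORITY.get(item.get("source"))
--         if rank is None:
--             continue
--         if best is None or rank < best[0]:
--             best = (rank, opt)
--     if best is not None:
--         return str(best[1])
--     first = scanners[0].get("option")
--     return str(first) if first else "X:12:1"
-- ===== Notes on version B (the rewrite author's own statement) =====
-- stated objective: alternative
-- what changed: Replaces A's nested priority-then-scanner loops with a single pass that tracks the minimum-priority-rank (first on ties) truthy option via an accumulator, plus the same literal fallbacks.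
import Mathlib
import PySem

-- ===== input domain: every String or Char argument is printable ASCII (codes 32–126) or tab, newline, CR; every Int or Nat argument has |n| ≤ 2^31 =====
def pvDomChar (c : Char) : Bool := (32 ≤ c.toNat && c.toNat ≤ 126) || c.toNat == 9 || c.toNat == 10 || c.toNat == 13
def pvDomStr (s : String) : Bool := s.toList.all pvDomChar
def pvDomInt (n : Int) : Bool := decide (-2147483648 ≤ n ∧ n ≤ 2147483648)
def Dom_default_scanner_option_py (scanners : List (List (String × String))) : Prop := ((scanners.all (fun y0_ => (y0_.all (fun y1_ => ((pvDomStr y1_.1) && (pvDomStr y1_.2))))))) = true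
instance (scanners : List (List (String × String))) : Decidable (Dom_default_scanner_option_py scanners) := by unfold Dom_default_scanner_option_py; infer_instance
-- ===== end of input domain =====

-- B replaces A's nested priority-then-scanner loops with one pass keeping the minimum-rank
-- (first on ties) truthy option in an accumulator; objective: alternative decomposition.

-- ===== PORT A =====
-- inner 'for item in scanners' loop for one preferred_source: first item whose source
-- equals src and whose option is truthy
def pvAScan (scanners : List (List (String × String))) (src : String) : Option String :=
  match scanners with
  | [] => none
  | item :: rest =>
    match (PySem.Dict.mk item).get? "option" with
    | some o =>
      if (PySem.Dict.mk item).get? "source" = some src ∧ o ≠ "" then some o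
      else pvAScan rest src
    | none => pvAScan rest src

def default_scanner_option_py (scanners : List (List (String × String))) : String :=
  match scanners with
  | [] => "X:12:1"
  | first :: _ =>
    match pvAScan scanners "actions-data-scan" with
    | some o => o
    | none =>
      match pvAScan scanners "config" with
      | some o => o
      | none =>
        match pvAScan scanners "built-in" with
        | some o => o
        | none =>
          match (PySem.Dict.mk first).get? "option" with
          | some o => if o ≠ "" then o else "X:12:1"
          | none => "X:12:1"

-- ===== PORT B =====
-- _PRIORITY.get(item.get("source")): the priority dict lookup with a possibly-None key,
-- ported by hand as a match (exact: a None key is never a dict key, other keys by string equality)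
def pvRank (src : Option String) : Option Nat :=
  match src with
  | some "actions-data-scan" => some 0
  | some "config" => some 1
  | some "built-in" => some 2
  | _ => none

-- one iteration of B's single loop over scanners, updating best : Option (rank, option)
def pvBStep (best : Option (Nat × String)) (item : List (String × String)) : Option (Nat × String) :=
  match (PySem.Dict.mk item).get? "option" with
  | none => best
  | some opt =>
    if opt = "" then best
    else
      match pvRank ((PySem.Dict.mk item).get? "source") with
      | none => best
      | some r =>
        match best with
        | none => some (r, opt)
        | some (rb, ob) => if r < rb then some (r, opt) else some (rb, ob)

def default_scanner_option_py_alt (scanners : List (List (String × String))) : String :=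
  match scanners with
  | [] => "X:12:1"
  | first :: _ =>
    match scanners.foldl pvBStep none with
    | some (_, o) => o
    | none =>
      match (PySem.Dict.mk first).get? "option" with
      | some o => if o ≠ "" then o else "X:12:1"
      | none => "X:12:1"

-- ===== PRECONDITION & SPEC =====
def Spec_default_scanner_option_py (scanners : List (List (String × String))) (out : String) : Prop := out = default_scanner_option_py_alt scanners
instance (scanners : List (List (String × String))) (out : String) : Decidable (Spec_default_scanner_option_py scanners out) := by unfold Spec_default_scanner_option_py; infer_instance

-- ===== CLAIM (what is proved, stated in full; the proofs are below) =====
def Claim_equal_default_scanner_option_py : Prop := ∀ (scanners : List (List (String × String))), Dom_default_scanner_option_py scanners → Spec_default_scanner_option_py scanners (default_scanner_option_py scanners)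

-- ===== LEMMAS AND PROOFS =====

-- contribution of one item to B's minimum: its (rank, option) if qualified, else none
def pvQual (item : List (String × String)) : Option (Nat × String) :=
  match (PySem.Dict.mk item).get? "option" with
  | none => none
  | some opt =>
    if opt = "" then none
    else (pvRank ((PySem.Dict.mk item).get? "source")).map (fun r => (r, opt))

-- left-biased minimum-by-rank
def pvMerge (a b : Option (Nat × String)) : Option (Nat × String) :=
  match a, b with
  | none, b => b
  | a, none => a
  | some (ra, oa), some (rb, ob) => if rb < ra then some (rb, ob) else some (ra, oa)

theorem pvMerge_none_right (a : Option (Nat × String)) : pvMerge a none = a := by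
  cases a <;> rfl

theorem pvBStep_eq_merge (b : Option (Nat × String)) (item : List (String × String)) :
    pvBStep b item = pvMerge b (pvQual item) := by
  unfold pvBStep pvQual
  cases (PySem.Dict.mk item).get? "option" with
  | none => exact (pvMerge_none_right b).symm
  | some opt =>
    simp only
    split_ifs with h
    · exact (pvMerge_none_right b).symm
    · cases pvRank ((PySem.Dict.mk item).get? "source") with
      | none => exact (pvMerge_none_right b).symm
      | some r => cases b with
        | none => rfl
        | some p => cases p; simp [pvMerge]
  
theorem pvMerge_none_left (b : Option (Nat × String)) : pvMerge none b = b := rfl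

theorem pvMerge_assoc (a b c : Option (Nat × String)) :
    pvMerge (pvMerge a b) c = pvMerge a (pvMerge b c) := by
  rcases a with _ | ⟨ra, oa⟩ <;> rcases b with _ | ⟨rb, ob⟩ <;> rcases c with _ | ⟨rc, oc⟩ <;>
    simp only [pvMerge] <;> split_ifs <;>
    first
      | rfl
      | omega
      | (simp only [pvMerge]; split_ifs <;> first | rfl | omega)

-- B's fold as a right fold of pvMerge over the items' contributions
def pvBest (scanners : List (List (String × String))) : Option (Nat × String) :=
  scanners.foldr (fun i acc => pvMerge (pvQual i) acc) none

theorem pvFold_eq_best (scanners : List (List (String × String))) (b : Option (Nat × String)) :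
    scanners.foldl pvBStep b = pvMerge b (pvBest scanners) := by
  induction scanners generalizing b with
  | nil => simp [pvBest, pvMerge_none_right]
  | cons i rest ih =>
    simp only [List.foldl_cons, ih, pvBStep_eq_merge, pvBest, List.foldr_cons, pvMerge_assoc]

-- B's minimum, phrased as A's three scans tried in priority order
theorem pvBest_eq_scans (scanners : List (List (String × String))) :
    pvBest scanners =
      match pvAScan scanners "actions-data-scan" with
      | some o => some (0, o)
      | none =>
        match pvAScan scanners "config" with
        | some o => some (1, o)
        | none =>
          match pvAScan scanners "built-in" with
          | some o => some (2, o)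
          | none => none := by
  induction scanners with
  | nil => rfl
  | cons item rest ih =>
    have hb : pvBest (item :: rest) = pvMerge (pvQual item) (pvBest rest) := rfl
    rw [hb, ih]
    unfold pvQual
    cases ho : (PySem.Dict.mk item).get? "option" with
    | none =>
      simp only [pvAScan, ho, pvMerge_none_left]
    | some o =>
      by_cases he : o = ""
      · subst he
        simp only [pvAScan, ho]
        simp [pvMerge_none_left]
      · cases hs : (PySem.Dict.mk item).get? "source" with
        | none =>
          simp only [pvAScan, ho, hs, pvRank, Option.map_none, pvMerge_none_left,
            if_neg he]
          rw [if_neg (fun h => absurd h.1 (by simp)),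
              if_neg (fun h => absurd h.1 (by simp)),
              if_neg (fun h => absurd h.1 (by simp))]
        | some s =>
          by_cases h1 : s = "actions-data-scan"
          · subst h1
            simp only [pvAScan, ho, hs, pvRank, if_neg he, Option.map_some]
            cases hr1 : pvAScan rest "actions-data-scan" <;>
              cases hr2 : pvAScan rest "config" <;>
              cases hr3 : pvAScan rest "built-in" <;>
              simp_all [pvMerge]
          · by_cases h2 : s = "config"
            · subst h2
              simp only [pvAScan, ho, hs, pvRank, if_neg he, Option.map_some]
              cases hr1 : pvAScan rest "actions-data-scan" <;>
                cases hr2 : pvAScan rest "config" <;>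
                cases hr3 : pvAScan rest "built-in" <;>
                simp_all [pvMerge]
            · by_cases h3 : s = "built-in"
              · subst h3
                simp only [pvAScan, ho, hs, pvRank, if_neg he, Option.map_some]
                cases hr1 : pvAScan rest "actions-data-scan" <;>
                  cases hr2 : pvAScan rest "config" <;>
                  cases hr3 : pvAScan rest "built-in" <;>
                  simp_all [pvMerge]
              · have hr : pvRank (some s) = none := by
                  unfold pvRank; split <;> simp_all
                simp only [pvAScan, ho, hs, hr, if_neg he, Option.map_none, pvMerge_none_left]
                rw [if_neg (fun h => h1 (Option.some.inj h.1)),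
                    if_neg (fun h => h2 (Option.some.inj h.1)),
                    if_neg (fun h => h3 (Option.some.inj h.1))]

-- ===== VERDICT (by name: the statement is the Claim_ definition above) =====
theorem default_scanner_option_py_spec : Claim_equal_default_scanner_option_py := by
  intro scanners _
  unfold Spec_default_scanner_option_py default_scanner_option_py default_scanner_option_py_alt
  cases scanners with
  | nil => rfl
  | cons first rest =>
    rw [pvFold_eq_best, pvBest_eq_scans]
    cases h1 : pvAScan (first :: rest) "actions-data-scan" <;>
      cases h2 : pvAScan (first :: rest) "config" <;>
      cases h3 : pvAScan (first :: rest) "built-in" <;>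
      simp [pvMerge]
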